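-- pv_equiv track=rewrite | github.com/UU114/memx | memorus/core/engines/generator/metadata_matcher.py | _prefix_match
-- ===== SOURCE A (Python) =====
-- def _prefix_match(tokens: list[str], candidates: list[str]) -> list[str]:
--     """Return candidates where any token is a prefix (case-insensitive).
--
--     A token ``t`` matches candidate ``c`` when ``c_lower.startswith(t)``.
--     """
--     if not candidates:
--         return []
--     matched: list[str] = []
--     for candidate in candidates:
--         c_lower = candidate.lower()
--         for token in tokens:
--             if c_lower.startswith(token):
--                 matched.append(candidate)
--                 break
--     return matched
-- ===== SOURCE B (Python) =====
-- def _prefix_match(tokens: list[str], candidates: list[str]) -> list[str]: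
--     """Return candidates where any token is a prefix (case-insensitive).
--
--     Hash-set formulation: a candidate matches iff one of its lowered prefixes
--     (cut at a length some token has) is itself in the token set, so the inner
--     scan over all tokens disappears.
--     """
--     token_set = set(tokens)
--     lengths = sorted({len(t) for t in tokens})
--     matched: list[str] = []
--     for candidate in candidates:
--         c_lower = candidate.lower()
--         if any(c_lower[:l] in token_set for l in lengths):
--             matched.append(candidate)
--     return matched
-- ===== Notes on version B (the rewrite author's own statement) =====
-- stated objective: faster
-- what changed: Replaces the inner scan over all tokens per candidate by a hash-set membership test of the candidate's lowered prefixes cut at each distinct token length, so the per-candidate cost depends on distinct token lengths instead of the number of tokens.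
import Mathlib
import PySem

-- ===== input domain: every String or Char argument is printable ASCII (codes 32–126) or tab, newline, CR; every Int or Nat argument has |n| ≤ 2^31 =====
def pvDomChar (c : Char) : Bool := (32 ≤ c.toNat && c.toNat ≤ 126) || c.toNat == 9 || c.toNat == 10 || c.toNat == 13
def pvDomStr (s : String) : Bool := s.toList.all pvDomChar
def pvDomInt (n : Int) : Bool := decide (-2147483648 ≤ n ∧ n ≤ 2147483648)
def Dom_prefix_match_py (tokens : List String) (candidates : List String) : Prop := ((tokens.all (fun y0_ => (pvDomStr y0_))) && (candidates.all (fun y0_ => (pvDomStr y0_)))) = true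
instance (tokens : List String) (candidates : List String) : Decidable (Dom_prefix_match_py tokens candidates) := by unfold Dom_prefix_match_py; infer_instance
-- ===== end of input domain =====

-- B replaces the inner scan over all tokens by a hash-set lookup of the candidate's
-- prefixes cut at the distinct token lengths (objective: faster inner step).

-- ===== PORT A =====
-- inner 'for token in tokens: if c_lower.startswith(token): matched.append(candidate); break'
def pvAScan (tokens : List String) (c_lower : String) (matched : List String) (candidate : String) : List String :=
  match tokens with
  | [] => matched
  | t :: ts =>
      if PySem.Str.startswith c_lower t then matched ++ [candidate]
      else pvAScan ts c_lower matched candidate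

def prefix_match_py (tokens : List String) (candidates : List String) : List String :=
  if candidates = [] then []
  else candidates.foldl
    (fun matched candidate => pvAScan tokens (PySem.Str.lower candidate) matched candidate) []

-- ===== PORT B =====
def prefix_match_py_alt (tokens : List String) (candidates : List String) : List String :=
  let tokenSet : PySem.Set String := PySem.Set.ofList tokens
  let lengths : List Int :=
    PySem.List.sorted (PySem.Set.ofList (tokens.map PySem.Str.len)) (fun x => x) false
  candidates.foldl
    (fun matched candidate =>
      let c_lower := PySem.Str.lower candidate
      if lengths.any (fun l => PySem.Set.contains tokenSet (PySem.Str.slice c_lower none (some l)))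
      then matched ++ [candidate] else matched) []

-- ===== PRECONDITION & SPEC =====
def Spec_prefix_match_py (tokens : List String) (candidates : List String) (out : List String) : Prop := out = prefix_match_py_alt tokens candidates
instance (tokens : List String) (candidates : List String) (out : List String) : Decidable (Spec_prefix_match_py tokens candidates out) := by unfold Spec_prefix_match_py; infer_instance

-- ===== CLAIM (what is proved, stated in full; the proofs are below) =====
def Claim_equal_prefix_match_py : Prop := ∀ (tokens : List String) (candidates : List String), Dom_prefix_match_py tokens candidates → Spec_prefix_match_py tokens candidates (prefix_match_py tokens candidates)

-- ===== LEMMAS AND PROOFS =====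

-- A's inner loop appends the candidate exactly when some token is a prefix
lemma pvAScan_eq (tokens : List String) (c : String) (matched : List String) (cand : String) :
    pvAScan tokens c matched cand =
      if tokens.any (fun t => PySem.Str.startswith c t) then matched ++ [cand] else matched := by
  induction tokens with
  | nil => simp [pvAScan]
  | cons t ts ih =>
      simp only [pvAScan, List.any_cons, ih]
      by_cases h : PySem.Chars.startswith c.toList t.toList = true
      · simp [h]
      · simp [h]

-- s[:n] as a character list
lemma pvSlice_toList (c : String) (n : Nat) :
    (PySem.Str.slice c none (some (n : Int))).toList = c.toList.take n := by
  simp [PySem.Str.slice, PySem.List.slice_to_natCast]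

-- the candidate-level tests of A and B agree
lemma pvAny_eq (tokens : List String) (c : String) :
    (tokens.any (fun t => PySem.Str.startswith c t)) =
      ((PySem.List.sorted (PySem.Set.ofList (tokens.map PySem.Str.len)) (fun x => x) false).any
        (fun l => PySem.Set.contains (PySem.Set.ofList tokens)
          (PySem.Str.slice c none (some l)))) := by
  apply Bool.eq_iff_iff.mpr
  simp only [List.any_eq_true, PySem.List.mem_sorted, PySem.Set.mem_ofList, List.mem_map,
    PySem.Set.contains_iff]
  constructor
  · rintro ⟨t, ht, hsw⟩
    refine ⟨PySem.Str.len t, ⟨t, ht, rfl⟩, ?_⟩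
    have hpre : t.toList <+: c.toList :=
      (PySem.Chars.startswith_iff c.toList t.toList).mp (by simpa using hsw)
    have hslice : PySem.Str.slice c none (some (PySem.Str.len t)) = t := by
      apply String.toList_inj.mp
      rw [PySem.Str.len_eq, pvSlice_toList]
      exact (List.prefix_iff_eq_take.mp hpre).symm
    rwa [hslice]
  · rintro ⟨l, ⟨t, ht, rfl⟩, hmem⟩
    refine ⟨PySem.Str.slice c none (some (PySem.Str.len t)), hmem, ?_⟩
    have : PySem.Chars.startswith c.toList
        (PySem.Str.slice c none (some (PySem.Str.len t))).toList = true := by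
      apply (PySem.Chars.startswith_iff _ _).mpr
      rw [PySem.Str.len_eq, pvSlice_toList]
      exact List.take_prefix _ _
    simpa using this

-- ===== VERDICT (by name: the statement is the Claim_ definition above) =====
theorem prefix_match_py_spec : Claim_equal_prefix_match_py := by
  intro tokens candidates _
  show prefix_match_py tokens candidates = prefix_match_py_alt tokens candidates
  unfold prefix_match_py prefix_match_py_alt
  by_cases hc : candidates = []
  · simp [hc]
  · simp only [if_neg hc]
    congr 1
    funext matched candidate
    rw [pvAScan_eq, pvAny_eq]
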